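-- pv_equiv track=rewrite | github.com/Genome-Bioinformatics-RadboudUMC/DeNovoCNN | denovonet/infer.py | check_chromosome
-- ===== SOURCE A (Python) =====
-- def check_chromosome(chromosome):
--     """
--     Check if chromosome in
--     ['1', ..., '23', 'X', 'Y', MT', 'M'] or
--     ['chr1', ..., 'chr23', 'chrX', 'chrY', chrMT', 'chrM']
--
--     Parameters:
--     chromosome (str): chromosome
--
--     Returns:
--     str: None if chromosome not in accepted lists, otherwise chromosome
--     """
--
--     accepted_chromosomes = [str(i) for i in range(1, 23)] + ['X', 'Y', 'MT', 'M']
--     accepted_chromosomes += ['chr'+ i for i in accepted_chromosomes]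
--
--     chromosome = str(chromosome)
--
--     if chromosome not in accepted_chromosomes:
--         print ('Skipping chromosome (bad naming):', chromosome)
--         return None
--
--     return chromosome
-- ===== SOURCE B (Python) =====
-- # B: strip optional 'chr' prefix, then test against the base name set (no doubled list).
-- BASE = {str(i) for i in range(1, 23)} | {'X', 'Y', 'MT', 'M'}
--
-- def check_chromosome(chromosome):
--     s = str(chromosome)
--     t = s[3:] if s.startswith('chr') else s
--     if t in BASE:
--         return s
--     print('Skipping chromosome (bad naming):', s)
--     return None
-- ===== Notes on version B (the rewrite author's own statement) =====
-- stated objective: simpler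
-- what changed: Instead of materialising the doubled 52-element accepted list and testing membership in it, B strips an optional 'chr' prefix and tests the remainder against the single 26-element base set.
import Mathlib
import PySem

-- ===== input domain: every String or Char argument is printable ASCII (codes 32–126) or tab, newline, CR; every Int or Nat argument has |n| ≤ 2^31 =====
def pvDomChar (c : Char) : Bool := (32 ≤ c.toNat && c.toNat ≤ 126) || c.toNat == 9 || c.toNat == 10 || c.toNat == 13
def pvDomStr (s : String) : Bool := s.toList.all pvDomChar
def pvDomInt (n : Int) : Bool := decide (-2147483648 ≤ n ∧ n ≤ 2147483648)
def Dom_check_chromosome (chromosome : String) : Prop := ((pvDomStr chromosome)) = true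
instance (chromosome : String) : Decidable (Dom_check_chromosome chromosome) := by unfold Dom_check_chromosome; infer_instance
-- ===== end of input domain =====

-- B strips an optional 'chr' prefix and tests the 26-element base set instead of
-- building the doubled 52-element accepted list; return value only (A and B also print on rejection).


-- ===== PORT A =====
-- accepted_chromosomes = [str(i) for i in range(1, 23)] + ['X', 'Y', 'MT', 'M']  (as char lists)
def acceptedBase : List (List Char) :=
  (PySem.List.pyRange 1 23 1).map PySem.Int.toChars ++ [['X'], ['Y'], ['M','T'], ['M']]

def check_chromosome (chromosome : String) : Option String :=
  let accepted := acceptedBase ++ acceptedBase.map (fun i => ['c','h','r'] ++ i)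
  if ¬ (chromosome.toList ∈ accepted) then none
  else some chromosome

-- ===== PORT B =====
def check_chromosome_alt (chromosome : String) : Option String :=
  let s := chromosome.toList
  let t := if PySem.Chars.startswith s ['c','h','r'] then PySem.Chars.slice s (some 3) none else s
  if t ∈ acceptedBase then some chromosome
  else none

-- ===== PRECONDITION & SPEC =====
def Spec_check_chromosome (chromosome : String) (out : Option String) : Prop := out = check_chromosome_alt chromosome
instance (chromosome : String) (out : Option String) : Decidable (Spec_check_chromosome chromosome out) := by unfold Spec_check_chromosome; infer_instance

-- ===== CLAIM (what is proved, stated in full; the proofs are below) =====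
def Claim_equal_check_chromosome : Prop := ∀ (chromosome : String), Dom_check_chromosome chromosome → Spec_check_chromosome chromosome (check_chromosome chromosome)

-- ===== LEMMAS AND PROOFS =====

-- no element of the base list starts with 'c' (closed computation)
lemma base_not_chr : ∀ b ∈ acceptedBase, ¬ ['c','h','r'] <+: b := by decide

-- membership in the 'chr'-prefixed half ↔ prefix test plus membership of the remainder
lemma mem_chr_half (l : List Char) :
    l ∈ acceptedBase.map (fun i => ['c','h','r'] ++ i) ↔
      (['c','h','r'] <+: l ∧ l.drop 3 ∈ acceptedBase) := by
  simp only [List.mem_map]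
  constructor
  · rintro ⟨b, hb, rfl⟩
    exact ⟨⟨b, rfl⟩, by simpa using hb⟩
  · rintro ⟨⟨rest, rfl⟩, hd⟩
    exact ⟨rest, by simpa using hd, rfl⟩

theorem check_chromosome_spec : Claim_equal_check_chromosome := by
  intro s _
  unfold Spec_check_chromosome check_chromosome check_chromosome_alt
  by_cases hp : ['c','h','r'] <+: s.toList
  · have hb : s.toList ∉ acceptedBase := fun h => base_not_chr _ h hp
    have hs : PySem.Chars.startswith s.toList ['c','h','r'] = true :=
      (PySem.Chars.startswith_iff _ _).mpr hp
    simp only [List.mem_append, mem_chr_half, hs, if_true,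
      PySem.Chars.slice_eq_listSlice,
      PySem.List.slice_from _ (by norm_num : (0:Int) ≤ 3)]
    by_cases hd : s.toList.drop 3 ∈ acceptedBase
    · simp [hb, hp, hd]
    · simp [hb, hp, hd]
  · have hs : PySem.Chars.startswith s.toList ['c','h','r'] = false := by
      by_contra h
      exact hp ((PySem.Chars.startswith_iff _ _).mp (by simpa using h))
    simp only [List.mem_append, mem_chr_half, hs, if_false, Bool.false_eq_true]
    by_cases hb : s.toList ∈ acceptedBase
    · simp [hb, hp]
    · simp [hb, hp]
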